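-- pv_equiv track=rewrite | github.com/TsaiZinan/Investment-Review-AI-Committee | scripts/generate_weekly_summary.py | dedupe_models
-- ===== SOURCE A (Python) =====
-- from typing import Dict, Iterable, List, Optional, Sequence, Set, Tuple
--
-- def canonicalize_model(raw_model: str) -> str:
--     s = raw_model.strip()
--     low = s.lower()
--     if low.startswith("gemini"):
--         return "Gemini"
--     if low.startswith("kimi"):
--         return "Kimi"
--     if low.startswith("minimax"):
--         return "MiniMax-M2.1"
--     if low.startswith("traeai"):
--         return "TraeAI"
--     if low.startswith("deepseek"):
--         return "DeepSeek"
--     if low.startswith("grok"):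
--         return "Grok-4"
--     if low.startswith("glm"):
--         return "GLM-4.7"
--     return s
--
-- def dedupe_models(header: List[str], model_indices: List[int]) -> Tuple[List[str], Dict[str, List[int]]]:
--     canonical_to_indices: Dict[str, List[int]] = {}
--     for idx in model_indices:
--         raw = header[idx].strip()
--         can = canonicalize_model(raw)
--         canonical_to_indices.setdefault(can, []).append(idx)
--     models = sorted(canonical_to_indices.keys())
--     return models, canonical_to_indices
-- ===== SOURCE B (Python) =====
-- # B: instead of growing a dict incrementally with setdefault, canonicalize once into
-- # (name, idx) pairs, dedupe the names in first-occurrence order, and build each group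
-- # by a per-name comprehension over the pairs (alternative decomposition, not faster).
-- from typing import Dict, List, Tuple
--
--
-- def canonicalize_model(raw_model: str) -> str:
--     s = raw_model.strip()
--     low = s.lower()
--     if low.startswith("gemini"):
--         return "Gemini"
--     if low.startswith("kimi"):
--         return "Kimi"
--     if low.startswith("minimax"):
--         return "MiniMax-M2.1"
--     if low.startswith("traeai"):
--         return "TraeAI"
--     if low.startswith("deepseek"):
--         return "DeepSeek"
--     if low.startswith("grok"):
--         return "Grok-4"
--     if low.startswith("glm"):
--         return "GLM-4.7"
--     return s
--
--
-- def dedupe_models(header: List[str], model_indices: List[int]) -> Tuple[List[str], Dict[str, List[int]]]: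
--     pairs = [(canonicalize_model(header[i].strip()), i) for i in model_indices]
--     keys = list(dict.fromkeys(c for c, _ in pairs))
--     groups = {k: [i for c, i in pairs if c == k] for k in keys}
--     return sorted(keys), groups
-- ===== Notes on version B (the rewrite author's own statement) =====
-- stated objective: alternative
-- what changed: Replaced the incremental setdefault-dict grouping loop by a three-step pipeline: canonicalize once into (name, idx) pairs, dedupe names in first-occurrence order, then build each group with a per-name filter over the pairs.
import Mathlib
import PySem

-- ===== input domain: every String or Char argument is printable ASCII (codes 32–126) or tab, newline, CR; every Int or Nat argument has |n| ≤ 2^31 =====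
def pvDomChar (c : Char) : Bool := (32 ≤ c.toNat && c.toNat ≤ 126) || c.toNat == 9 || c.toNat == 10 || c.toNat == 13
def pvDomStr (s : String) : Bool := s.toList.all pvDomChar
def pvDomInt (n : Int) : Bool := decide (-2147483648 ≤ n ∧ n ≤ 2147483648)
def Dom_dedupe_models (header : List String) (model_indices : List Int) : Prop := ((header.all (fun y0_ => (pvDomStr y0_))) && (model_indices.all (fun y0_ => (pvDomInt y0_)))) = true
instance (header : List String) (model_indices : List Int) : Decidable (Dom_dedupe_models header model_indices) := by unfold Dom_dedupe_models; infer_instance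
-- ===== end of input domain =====

-- B replaces A's incremental setdefault-dict grouping by: canonicalize into pairs once,
-- dedupe names in first-occurrence order, then build each group by a per-name filter
-- (alternative decomposition, not faster).


-- ===== PORT A =====
def canonicalize_model (raw_model : String) : String :=
  let s := PySem.Str.strip raw_model
  let low := PySem.Str.lower s
  if PySem.Str.startswith low "gemini" then "Gemini"
  else if PySem.Str.startswith low "kimi" then "Kimi"
  else if PySem.Str.startswith low "minimax" then "MiniMax-M2.1"
  else if PySem.Str.startswith low "traeai" then "TraeAI"
  else if PySem.Str.startswith low "deepseek" then "DeepSeek"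
  else if PySem.Str.startswith low "grok" then "Grok-4"
  else if PySem.Str.startswith low "glm" then "GLM-4.7"
  else s

def dedupe_models (header : List String) (model_indices : List Int) : List String × (List (String × List Int)) :=
  let canonical_to_indices : PySem.Dict String (List Int) :=
    model_indices.foldl
      (fun d idx =>
        let raw := PySem.Str.strip (PySem.List.pyGetD header idx "")
        let can := canonicalize_model raw
        -- d.setdefault(can, []).append(idx)  ==  d[can] = d.get(can, []) + [idx]
        PySem.Dict.modify d can [] (fun l => l ++ [idx]))
      PySem.Dict.empty
  let models := PySem.List.sorted (PySem.Dict.keys canonical_to_indices) (fun x => x) false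
  (models, PySem.Dict.items canonical_to_indices)

-- ===== PORT B =====
def dedupe_models_alt (header : List String) (model_indices : List Int) : List String × (List (String × List Int)) :=
  let pairs : List (String × Int) :=
    model_indices.map (fun i => (canonicalize_model (PySem.Str.strip (PySem.List.pyGetD header i "")), i))
  let keys := PySem.List.dedup (pairs.map Prod.fst)          -- dict.fromkeys, first-occurrence order
  let groups := keys.map (fun k => (k, (pairs.filter (fun p => p.1 == k)).map Prod.snd))
  (PySem.List.sorted keys (fun x => x) false, groups)

-- ===== PRECONDITION & SPEC =====
-- Pre_ excludes exactly the inputs where Python A raises IndexError on header[idx].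
def Pre_dedupe_models (header : List String) (model_indices : List Int) : Prop :=
  ∀ i ∈ model_indices, PySem.Raise.InRange header.length i
instance (header : List String) (model_indices : List Int) : Decidable (Pre_dedupe_models header model_indices) := by unfold Pre_dedupe_models; infer_instance
def pvWitness_dedupe_models : List String × List Int :=
  (["gemini-pro", " Kimi k2", "other"], [0, 1, 2, -3, 1])

def Spec_dedupe_models (header : List String) (model_indices : List Int) (out : List String × (List (String × List Int))) : Prop := out = dedupe_models_alt header model_indices
instance (header : List String) (model_indices : List Int) (out : List String × (List (String × List Int))) : Decidable (Spec_dedupe_models header model_indices out) := by unfold Spec_dedupe_models; infer_instance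

-- ===== CLAIM (what is proved, stated in full; the proofs are below) =====
def Claim_equal_dedupe_models : Prop := ∀ (header : List String) (model_indices : List Int), Dom_dedupe_models header model_indices → Pre_dedupe_models header model_indices → Spec_dedupe_models header model_indices (dedupe_models header model_indices)

-- ===== LEMMAS AND PROOFS =====

theorem pv_find?_map_pair {κ ν : Type} [BEq κ] [LawfulBEq κ] (ks : List κ) (h : κ → ν) (x : κ) :
    ((ks.map (fun k => (k, h k))).find? (fun p => p.1 == x))
      = if x ∈ ks then some (x, h x) else none := by
  induction ks with
  | nil => simp
  | cons k t ih =>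
    by_cases hk : k = x
    · subst hk; simp
    · have hb : (k == x) = false := by simp [hk]
      simp [hb, ih, Ne.symm hk]

theorem pv_items_modify_pos {κ ν : Type} [BEq κ] (d : PySem.Dict κ ν) (k : κ) (d0 : ν) (g : ν → ν)
    (h : d.contains k = true) :
    (d.modify k d0 g).items = d.items.map (fun p => if p.1 == k then (k, g (d.getD k d0)) else p) := by
  simp [PySem.Dict.modify, PySem.Dict.insert, h]

theorem pv_items_modify_neg {κ ν : Type} [BEq κ] (d : PySem.Dict κ ν) (k : κ) (d0 : ν) (g : ν → ν)
    (h : d.contains k = false) :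
    (d.modify k d0 g).items = d.items ++ [(k, g (d.getD k d0))] := by
  simp [PySem.Dict.modify, PySem.Dict.insert, h]

theorem pv_group_items {α κ : Type} [BEq κ] [LawfulBEq κ] (f : α → κ) (idxs : List α) :
    (idxs.foldl (fun d i => PySem.Dict.modify d (f i) [] (fun l => l ++ [i])) PySem.Dict.empty).items
      = (PySem.List.dedup (idxs.map f)).map (fun k => (k, idxs.filter (fun i => f i == k))) := by
  induction idxs using List.reverseRecOn with
  | nil => rfl
  | append_singleton l i ih =>
    rw [List.foldl_append, List.foldl_cons, List.foldl_nil]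
    have hded : PySem.List.dedup ((l ++ [i]).map f)
        = PySem.Set.add (PySem.List.dedup (l.map f)) (f i) := by
      simp [PySem.List.dedup, PySem.Set.ofList, List.foldl_append]
    by_cases hmem : f i ∈ l.map f
    · have hmem' : f i ∈ PySem.List.dedup (l.map f) := by
        simpa [PySem.List.dedup] using (PySem.Set.mem_ofList (l.map f) (f i)).2 hmem
      have hcontains : (PySem.Dict.contains
          ((l.foldl (fun d i => PySem.Dict.modify d (f i) [] (fun l => l ++ [i])) PySem.Dict.empty)) (f i)) = true := by
        simp [PySem.Dict.contains, ih]
        obtain ⟨a, ha, hfa⟩ := List.mem_map.1 hmem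
        exact ⟨a, ha, hfa⟩
      have hget : (PySem.Dict.getD
          ((l.foldl (fun d i => PySem.Dict.modify d (f i) [] (fun l => l ++ [i])) PySem.Dict.empty)) (f i) [])
            = l.filter (fun j => f j == f i) := by
        simp only [PySem.Dict.getD, PySem.Dict.get?, ih]
        rw [pv_find?_map_pair]
        have : f i ∈ PySem.Set.ofList (l.map f) := by simpa [PySem.List.dedup] using hmem'
        simp [PySem.List.dedup, this]
      have hadd : PySem.Set.add (PySem.List.dedup (l.map f)) (f i) = PySem.List.dedup (l.map f) := by
        simp [PySem.Set.add]
        obtain ⟨a, ha, hfa⟩ := List.mem_map.1 hmem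
        exact ⟨a, ha, hfa⟩
      rw [pv_items_modify_pos _ _ _ _ hcontains, hget, ih, hded, hadd, List.map_map]
      apply List.map_congr_left
      intro k hk
      by_cases hki : k = f i
      · subst hki
        simp [List.filter_append]
      · have hb : (k == f i) = false := by simp [hki]
        simp only [Function.comp_apply, hb, Bool.false_eq_true, if_false, List.filter_append]
        have : List.filter (fun i_1 => f i_1 == k) [i] = [] := by
          rw [List.filter_singleton]
          simp [Bool.cond_eq_ite, Ne.symm hki]
        simp [this]
    · have hmem' : f i ∉ PySem.List.dedup (l.map f) := by
        intro h
        exact hmem ((PySem.Set.mem_ofList (l.map f) (f i)).1 (by simpa [PySem.List.dedup] using h))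
      have hcontains : (PySem.Dict.contains
          ((l.foldl (fun d i => PySem.Dict.modify d (f i) [] (fun l => l ++ [i])) PySem.Dict.empty)) (f i)) = false := by
        simp [PySem.Dict.contains, ih]
        exact fun a ha h => hmem (List.mem_map.2 ⟨a, ha, h⟩)
      have hget : (PySem.Dict.getD
          ((l.foldl (fun d i => PySem.Dict.modify d (f i) [] (fun l => l ++ [i])) PySem.Dict.empty)) (f i) [])
            = [] := by
        simp only [PySem.Dict.getD, PySem.Dict.get?, ih]
        rw [pv_find?_map_pair]
        have : f i ∉ PySem.Set.ofList (l.map f) := by simpa [PySem.List.dedup] using hmem'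
        simp [this]
      have hadd : PySem.Set.add (PySem.List.dedup (l.map f)) (f i)
          = PySem.List.dedup (l.map f) ++ [f i] := by
        simp [PySem.Set.add]
        exact fun a ha h => hmem (List.mem_map.2 ⟨a, ha, h⟩)
      rw [pv_items_modify_neg _ _ _ _ hcontains, hget, ih, hded, hadd, List.map_append]
      congr 1
      · apply List.map_congr_left
        intro k hk
        have hkl : k ∈ l.map f := (PySem.Set.mem_ofList (l.map f) k).1 (by simpa [PySem.List.dedup] using hk)
        have hki : k ≠ f i := fun h => hmem (h ▸ hkl)
        have : List.filter (fun i_1 => f i_1 == k) [i] = [] := by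
          rw [List.filter_singleton]
          simp [Bool.cond_eq_ite, Ne.symm hki]
        simp [List.filter_append, this]
      · simp [List.filter_append]
        exact fun j hj h => hmem (List.mem_map.2 ⟨j, hj, h⟩)

-- ===== VERDICT (by name: the statement is the Claim_ definition above) =====
theorem dedupe_models_spec : Claim_equal_dedupe_models := by
  intro header model_indices _ _
  unfold Spec_dedupe_models
  simp only [dedupe_models, dedupe_models_alt]
  have h := pv_group_items
    (fun i => canonicalize_model (PySem.Str.strip (PySem.List.pyGetD header i ""))) model_indices
  refine Prod.ext ?_ ?_
  · -- the sorted key lists agree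
    simp only [PySem.Dict.keys, h, List.map_map, Function.comp_def, List.map_id']
  · -- the grouped items agree
    rw [h]
    simp only [List.map_map, Function.comp_def]
    apply List.map_congr_left
    intro k hk
    simp [List.filter_map, Function.comp_def]
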